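-- pv_equiv track=rewrite | github.com/MrChepe09/Competitive-Programming-Codes | Codechef July Challenge 2020/CRDGAME.py | chefcard
-- ===== SOURCE A (Python) =====
-- def sumdig(n):
--    r = 0
--    while n:
--        r, n = r + n % 10, n // 10
--    return r
--
-- def chefcard(n, a):
--     chef = 0
--     monty = 0
--     for i in range(len(a)):
--         c = sumdig(a[i][0])
--         m = sumdig(a[i][1])
--         if(c > m):
--             chef += 1
--         elif(c < m):
--             monty += 1
--         else:
--             chef += 1
--             monty += 1
--     if(chef>monty):
--         return [0, chef]
--     elif(chef<monty):
--         return [1, monty]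
--     else:
--         return [2, monty]
-- ===== SOURCE B (Python) =====
-- def dsum(m):
--     return 0 if not m else m % 10 + dsum(m // 10)
--
-- def chefcard(n, a):
--     signs = [(dsum(x) > dsum(y)) - (dsum(x) < dsum(y)) for x, y in a]
--     cw, mw, t = signs.count(1), signs.count(-1), len(a)
--     if cw > mw:
--         return [0, t - mw]
--     if cw < mw:
--         return [1, t - cw]
--     return [2, t - cw]
-- ===== Notes on version B (the rewrite author's own statement) =====
-- stated objective: alternative
-- what changed: Instead of tallying both players' scores with a three-way branch, B builds a list of per-round comparison signs in one staged pass, counts only the strict wins of each side, and reconstructs each score as its complement (rounds - opponent's strict wins), with a recursive digit sum in place of the while loop.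
import Mathlib
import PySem

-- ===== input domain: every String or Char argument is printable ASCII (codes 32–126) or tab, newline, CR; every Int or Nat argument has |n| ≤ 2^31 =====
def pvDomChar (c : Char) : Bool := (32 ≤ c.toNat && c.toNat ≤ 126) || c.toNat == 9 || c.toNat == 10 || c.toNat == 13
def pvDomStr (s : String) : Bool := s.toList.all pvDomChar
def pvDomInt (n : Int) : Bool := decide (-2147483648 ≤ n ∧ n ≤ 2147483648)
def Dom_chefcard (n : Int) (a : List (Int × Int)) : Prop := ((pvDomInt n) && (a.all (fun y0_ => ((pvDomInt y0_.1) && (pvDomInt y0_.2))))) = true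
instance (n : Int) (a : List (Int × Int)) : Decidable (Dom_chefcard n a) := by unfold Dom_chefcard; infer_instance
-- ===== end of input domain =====

-- B stages the computation differently: a list of per-round comparison signs, strict-win counts,
-- and each score reconstructed as rounds minus the opponent's strict wins (alternative decomposition; same cost).

-- ===== PORT A =====
-- sumdig's while loop; for n < 0 the Python loop never returns, so no return value is claimed there
def sumdigLoop (r : Int) (n : Int) : Int :=
  if _h : 0 < n then sumdigLoop (r + PySem.Int.mod n 10) (PySem.Int.floordiv n 10) else r
termination_by n.toNat
decreasing_by
  simp only [PySem.Int.floordiv, Int.fdiv_eq_ediv]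
  omega

def sumdig (n : Int) : Int := sumdigLoop 0 n

-- the for-loop of A over the rounds, carrying the two tallies
def chefLoop (l : List (Int × Int)) (chef monty : Int) : Int × Int :=
  match l with
  | [] => (chef, monty)
  | (x, y) :: t =>
    let c := sumdig x
    let m := sumdig y
    if c > m then chefLoop t (chef + 1) monty
    else if c < m then chefLoop t chef (monty + 1)
    else chefLoop t (chef + 1) (monty + 1)

def chefcard (n : Int) (a : List (Int × Int)) : List Int :=
  let p := chefLoop a 0 0
  let chef := p.1
  let monty := p.2
  if chef > monty then [0, chef]
  else if chef < monty then [1, monty]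
  else [2, monty]

-- ===== PORT B =====
-- B's recursive digit sum; for m < 0 the Python recursion never returns, so no return value is claimed there;
-- the 0 < m guard only makes the same recursion total in Lean.
def dsum (m : Int) : Int :=
  if _h : 0 < m then PySem.Int.mod m 10 + dsum (PySem.Int.floordiv m 10) else 0
termination_by m.toNat
decreasing_by
  simp only [PySem.Int.floordiv, Int.fdiv_eq_ediv]
  omega

-- (dsum(x) > dsum(y)) - (dsum(x) < dsum(y)): Python bools subtract as 0/1
def signOf (x y : Int) : Int :=
  (if dsum x > dsum y then (1 : Int) else 0) - (if dsum x < dsum y then (1 : Int) else 0)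

def chefcard_alt (n : Int) (a : List (Int × Int)) : List Int :=
  let signs := a.map (fun p => signOf p.1 p.2)
  let cw : Int := (signs.count 1 : Nat)
  let mw : Int := (signs.count (-1) : Nat)
  let t : Int := (a.length : Nat)
  if cw > mw then [0, t - mw]
  else if cw < mw then [1, t - cw]
  else [2, t - cw]

-- ===== PRECONDITION & SPEC =====  (none: A = B is claimed on all of Dom)
def Spec_chefcard (n : Int) (a : List (Int × Int)) (out : List Int) : Prop := out = chefcard_alt n a
instance (n : Int) (a : List (Int × Int)) (out : List Int) : Decidable (Spec_chefcard n a out) := by unfold Spec_chefcard; infer_instance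

-- ===== CLAIM (what is proved, stated in full; the proofs are below) =====
def Claim_equal_chefcard : Prop := ∀ (n : Int) (a : List (Int × Int)), Dom_chefcard n a → Spec_chefcard n a (chefcard n a)

-- ===== LEMMAS AND PROOFS =====
theorem sumdigLoop_eq (r n : Int) : sumdigLoop r n = r + dsum n := by
  induction r, n using sumdigLoop.induct with
  | case1 r n h ih =>
    rw [sumdigLoop, dsum]
    simp only [h, dif_pos, ih]
    ring
  | case2 r n h =>
    rw [sumdigLoop, dsum]
    simp [h]

theorem chefLoop_eq (l : List (Int × Int)) (chef monty : Int) :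
    chefLoop l chef monty =
      (chef + (l.length : Int) - ((l.map (fun p => signOf p.1 p.2)).count (-1) : Nat),
       monty + (l.length : Int) - ((l.map (fun p => signOf p.1 p.2)).count 1 : Nat)) := by
  induction l generalizing chef monty with
  | nil => simp [chefLoop]
  | cons hd t ih =>
    obtain ⟨x, y⟩ := hd
    have hs : sumdig x = dsum x := sumdigLoop_eq 0 x |>.trans (by ring)
    have hs' : sumdig y = dsum y := sumdigLoop_eq 0 y |>.trans (by ring)
    rcases lt_trichotomy (dsum y) (dsum x) with h | h | h
    · have hsign : signOf x y = 1 := by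
        simp [signOf, h, not_lt.2 (le_of_lt h)]
      simp only [chefLoop, hs, hs', h, if_pos, ih, List.map_cons, hsign, List.count_cons,
        List.length_cons, Prod.mk.injEq]
      norm_num
      constructor <;> push_cast <;> ring
    · have hsign : signOf x y = 0 := by simp [signOf, h]
      simp only [chefLoop, hs, hs', h, lt_irrefl, if_neg, if_false, ih, List.map_cons, hsign,
        List.count_cons, List.length_cons, Prod.mk.injEq]
      norm_num
      constructor <;> push_cast <;> ring
    · have hsign : signOf x y = -1 := by
        simp [signOf, h, not_lt.2 (le_of_lt h)]
      simp only [chefLoop, hs, hs', h, not_lt.2 (le_of_lt h), if_neg, ih, List.map_cons, hsign,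
        List.count_cons, List.length_cons, Prod.mk.injEq]
      norm_num
      constructor <;> push_cast <;> ring

-- ===== VERDICT (by name: the statement is the Claim_ definition above) =====
theorem chefcard_spec : Claim_equal_chefcard := by
  intro n a _
  unfold Spec_chefcard chefcard chefcard_alt
  rw [chefLoop_eq]
  have hcw : ((a.map (fun p => signOf p.1 p.2)).count 1) ≤ a.length := by
    simpa using List.count_le_length (l := a.map (fun p => signOf p.1 p.2)) (a := 1)
  have hmw : ((a.map (fun p => signOf p.1 p.2)).count (-1)) ≤ a.length := by
    simpa using List.count_le_length (l := a.map (fun p => signOf p.1 p.2)) (a := -1)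
  simp only []
  split_ifs with h1 h2 h3 h4 h5 h6 h7 h8 <;> simp_all <;> omega
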